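-- pv_equiv track=rewrite | github.com/PoojaDeswal94/Pacman-with-Pygame | Pygame/Maze3_main.py | loadMaze1
-- ===== SOURCE A (Python) =====
-- def loadMaze1(input_file3):
--     maze3=[]
--     l=len(input_file3)
--     ln=len(input_file3[0])
--     for i in range(0,l):
--         for j in range(0,ln):
--             if input_file3[i][j]== "1" :
--                 maze3.append(input_file3[i][j])
--             elif input_file3[i][j]== "0" :
--                 maze3.append(input_file3[i][j])
--             elif input_file3[i][j]== "s" :
--                 maze3.append(input_file3[i][j])
--             elif input_file3[i][j]== "e" :
--                 maze3.append(input_file3[i][j])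
--             elif input_file3[i][j]== "a" :
--                 maze3.append(input_file3[i][j])
--             elif input_file3[i][j]== "b" :
--                 maze3.append(input_file3[i][j])
--             elif input_file3[i][j]== "c" :
--                 maze3.append(input_file3[i][j])
--             elif input_file3[i][j]== "d" :
--                 maze3.append(input_file3[i][j])
--             elif input_file3[i][j]== "f" :
--                 maze3.append(input_file3[i][j])
--             elif input_file3[i][j]== "g" :
--                 maze3.append(input_file3[i][j])
--             elif input_file3[i][j]== "h" :
--                 maze3.append(input_file3[i][j])
--             elif input_file3[i][j]== "i" :
--                 maze3.append(input_file3[i][j])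
--             else:
--                 continue
--     def to_matrix(list1, n):
--         return [list1[i:i+n] for i in range(0,len(list1),n)]
--
--     maze1=to_matrix(maze3,18)
--     return maze1
-- ===== SOURCE B (Python) =====
-- def loadMaze1(input_file3):
--     allowed = {"1", "0", "s", "e", "a", "b", "c", "d", "f", "g", "h", "i"}
--     ln = len(input_file3[0])
--     result = []
--     current_row = []
--     for row in input_file3:
--         for j in range(ln):
--             ch = row[j]
--             if ch in allowed:
--                 current_row.append(ch)
--                 if len(current_row) == 18:
--                     result.append(current_row)
--                     current_row = []
--     if current_row:
--         result.append(current_row)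
--     return result
-- ===== Notes on version B (the rewrite author's own statement) =====
-- stated objective: faster
-- what changed: Fuses filtering and chunking into one pass: a running current_row is flushed every 18 kept cells, replacing A's 12-branch elif chain (set membership instead) and its separate flat-list build plus slice-based to_matrix reshape.
import Mathlib
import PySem

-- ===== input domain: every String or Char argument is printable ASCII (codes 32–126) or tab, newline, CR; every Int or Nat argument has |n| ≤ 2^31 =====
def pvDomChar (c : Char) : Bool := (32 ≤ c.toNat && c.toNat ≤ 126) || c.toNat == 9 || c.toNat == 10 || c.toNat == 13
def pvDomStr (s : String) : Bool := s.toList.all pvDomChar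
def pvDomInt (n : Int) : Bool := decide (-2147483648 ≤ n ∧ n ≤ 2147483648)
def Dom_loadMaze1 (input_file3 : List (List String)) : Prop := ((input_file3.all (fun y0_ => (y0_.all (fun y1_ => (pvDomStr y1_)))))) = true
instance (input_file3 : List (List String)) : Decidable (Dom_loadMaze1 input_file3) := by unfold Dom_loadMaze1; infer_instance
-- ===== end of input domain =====

-- B fuses A's filter pass and slice-based reshape into one pass with a running row flushed
-- every 18 kept cells (objective: simpler); same return value on all inputs admitted by Pre_.

-- ===== PORT A =====
-- literal transliteration of A: flat filtered list, then to_matrix via slices over range(0, len, 18)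
def loadMaze1 (input_file3 : List (List String)) : List (List String) :=
  let l : Int := PySem.List.len input_file3
  let ln : Int := PySem.List.len (PySem.List.pyGetD input_file3 0 [])
  let maze3 : List String :=
    (PySem.List.pyRange 0 l 1).foldl (fun acc i =>
      (PySem.List.pyRange 0 ln 1).foldl (fun acc j =>
        let c := PySem.List.pyGetD (PySem.List.pyGetD input_file3 i []) j ""
        if c = "1" then acc ++ [c]
        else if c = "0" then acc ++ [c]
        else if c = "s" then acc ++ [c]
        else if c = "e" then acc ++ [c]
        else if c = "a" then acc ++ [c]
        else if c = "b" then acc ++ [c]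
        else if c = "c" then acc ++ [c]
        else if c = "d" then acc ++ [c]
        else if c = "f" then acc ++ [c]
        else if c = "g" then acc ++ [c]
        else if c = "h" then acc ++ [c]
        else if c = "i" then acc ++ [c]
        else acc) acc) []
  (PySem.List.pyRange 0 (PySem.List.len maze3) 18).map
    (fun i => PySem.List.slice maze3 (some i) (some (i + 18)))

-- ===== PORT B =====
-- the allowed set (distinct elements of B's set literal)
def pvAllowed : List String := ["1", "0", "s", "e", "a", "b", "c", "d", "f", "g", "h", "i"]

def loadMaze1_alt (input_file3 : List (List String)) : List (List String) :=
  let ln : Int := PySem.List.len (input_file3.headD [])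
  let st : List (List String) × List String :=
    input_file3.foldl (fun st row =>
      (PySem.List.pyRange 0 ln 1).foldl (fun st j =>
        let ch := PySem.List.pyGetD row j ""
        if pvAllowed.contains ch then
          let cur := st.2 ++ [ch]
          if cur.length = 18 then (st.1 ++ [cur], []) else (st.1, cur)
        else st) st) ([], [])
  if st.2.isEmpty then st.1 else st.1 ++ [st.2]

-- ===== PRECONDITION & SPEC =====
-- Pre_ excludes exactly the inputs on which Python A raises IndexError: the empty list
-- (input_file3[0]) and ragged inputs with a row shorter than the first row (input_file3[i][j]).
def Pre_loadMaze1 (input_file3 : List (List String)) : Prop :=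
  input_file3 ≠ [] ∧ ∀ row ∈ input_file3, (input_file3.headD []).length ≤ row.length
instance (input_file3 : List (List String)) : Decidable (Pre_loadMaze1 input_file3) := by
  unfold Pre_loadMaze1; infer_instance
def pvWitness_loadMaze1 : List (List String) := [["1", "0", "x"], ["s", "e", "a"]]
def Spec_loadMaze1 (input_file3 : List (List String)) (out : List (List String)) : Prop := out = loadMaze1_alt input_file3
instance (input_file3 : List (List String)) (out : List (List String)) : Decidable (Spec_loadMaze1 input_file3 out) := by unfold Spec_loadMaze1; infer_instance

-- ===== CLAIM (what is proved, stated in full; the proofs are below) =====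
def Claim_equal_loadMaze1 : Prop := ∀ (input_file3 : List (List String)), Dom_loadMaze1 input_file3 → Pre_loadMaze1 input_file3 → Spec_loadMaze1 input_file3 (loadMaze1 input_file3)

-- ===== LEMMAS AND PROOFS =====

def pvKeep (c : String) : Bool := pvAllowed.contains c

def pvRowChars (ln : Int) (row : List String) : List String :=
  (PySem.List.pyRange 0 ln 1).map (fun j => PySem.List.pyGetD row j "")

def pvFlat (xs : List (List String)) : List String :=
  xs.flatMap (fun row => (pvRowChars (PySem.List.len (xs.headD [])) row).filter pvKeep)

def pvChunk (m : List String) : List (List String) :=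
  if h : m = [] then [] else m.take 18 :: pvChunk (m.drop 18)
termination_by m.length
decreasing_by
  cases m with
  | nil => exact absurd rfl h
  | cons a t => simp

def pvPush (st : List (List String) × List String) (c : String) :
    List (List String) × List String :=
  let cur := st.2 ++ [c]
  if cur.length = 18 then (st.1 ++ [cur], []) else (st.1, cur)

def pvFinish (st : List (List String) × List String) : List (List String) :=
  if st.2.isEmpty then st.1 else st.1 ++ [st.2]

-- A's 12-branch elif chain, as a named step (definitionally the port's inner body)
def pvStepA (acc : List String) (c : String) : List String :=
  if c = "1" then acc ++ [c]
  else if c = "0" then acc ++ [c]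
  else if c = "s" then acc ++ [c]
  else if c = "e" then acc ++ [c]
  else if c = "a" then acc ++ [c]
  else if c = "b" then acc ++ [c]
  else if c = "c" then acc ++ [c]
  else if c = "d" then acc ++ [c]
  else if c = "f" then acc ++ [c]
  else if c = "g" then acc ++ [c]
  else if c = "h" then acc ++ [c]
  else if c = "i" then acc ++ [c]
  else acc

-- B's guarded step, named (definitionally the port's inner body)
def pvStepB (st : List (List String) × List String) (ch : String) :
    List (List String) × List String :=
  if pvKeep ch then pvPush st ch else st

-- the elif chain is exactly "append iff the cell is in the allowed set"
lemma pvStepA_eq : pvStepA = fun acc c => if pvKeep c then acc ++ [c] else acc := by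
  funext acc c
  by_cases hk : pvKeep c = true
  · simp only [hk, if_true]
    simp only [pvKeep, pvAllowed, List.contains_eq_mem, List.mem_cons, List.not_mem_nil,
      or_false, decide_eq_true_eq] at hk
    rcases hk with h | h | h | h | h | h | h | h | h | h | h | h <;> subst h <;> rfl
  · simp only [hk, Bool.false_eq_true, if_false]
    simp only [pvKeep, pvAllowed, List.contains_eq_mem, List.mem_cons, List.not_mem_nil,
      or_false, decide_eq_true_eq, not_or] at hk
    obtain ⟨h1, h2, h3, h4, h5, h6, h7, h8, h9, h10, h11, h12⟩ := hk
    simp [pvStepA, h1, h2, h3, h4, h5, h6, h7, h8, h9, h10, h11, h12]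

-- A's inner loop over one row collects the kept cells of that row
lemma pvRowA (ln : Int) (row acc : List String) :
    (PySem.List.pyRange 0 ln 1).foldl (fun acc j => pvStepA acc (PySem.List.pyGetD row j "")) acc
      = acc ++ (pvRowChars ln row).filter pvKeep := by
  rw [pvRowChars, ← List.foldl_map, pvStepA_eq]
  exact PySem.List.foldl_append_if_eq_filter pvKeep _ acc

-- B's inner loop over one row pushes the kept cells of that row
lemma pvRowB (ln : Int) (row : List String) (st : List (List String) × List String) :
    (PySem.List.pyRange 0 ln 1).foldl (fun st j => pvStepB st (PySem.List.pyGetD row j "")) st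
      = ((pvRowChars ln row).filter pvKeep).foldl pvPush st := by
  rw [pvRowChars, ← List.foldl_map]
  exact PySem.List.foldl_if_eq_foldl_filter pvKeep pvPush _ st

-- folding row by row is folding over the concatenation of the rows' kept cells
lemma pvFoldlFlatMap (g : List String → List String) (rows : List (List String))
    (st : List (List String) × List String) :
    rows.foldl (fun st row => (g row).foldl pvPush st) st
      = (rows.flatMap g).foldl pvPush st := by
  induction rows generalizing st with
  | nil => rfl
  | cons r rs ih => simp only [List.foldl_cons, List.flatMap_cons, List.foldl_append, ih]

lemma pvChunk_append18 (a m : List String) (ha : a.length = 18) :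
    pvChunk (a ++ m) = a :: pvChunk m := by
  rw [pvChunk]
  have hne : a ++ m ≠ [] := by
    intro h; have := congrArg List.length h; simp [ha] at this
  simp only [hne, dite_false]
  rw [List.take_left' ha, List.drop_left' ha]

-- the fused push over a flat list, then finish, chunks it into 18-blocks
lemma pvGo (m : List String) : ∀ (res : List (List String)) (cur : List String),
    cur.length < 18 →
    pvFinish (m.foldl pvPush (res, cur)) = res ++ pvChunk (cur ++ m) := by
  induction m with
  | nil =>
    intro res cur hlt
    simp only [List.foldl_nil, List.append_nil, pvFinish]
    by_cases h : cur = []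
    · subst h; simp [pvChunk]
    · rw [pvChunk]
      simp only [h, dite_false]
      rw [pvChunk]
      have ht : cur.take 18 = cur := List.take_of_length_le (by omega)
      have hd : cur.drop 18 = [] := List.drop_eq_nil_of_le (by omega)
      simp [h, ht, hd, List.isEmpty_iff]
  | cons c m ih =>
    intro res cur hlt
    simp only [List.foldl_cons]
    rw [show pvPush (res, cur) c =
        if (cur ++ [c]).length = 18 then (res ++ [cur ++ [c]], [])
        else (res, cur ++ [c]) from rfl]
    by_cases h18 : (cur ++ [c]).length = 18
    · simp only [h18, if_true]
      rw [ih (res ++ [cur ++ [c]]) [] (by simp)]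
      rw [show cur ++ c :: m = (cur ++ [c]) ++ m by simp]
      rw [pvChunk_append18 _ _ h18]
      simp
    · simp only [h18, if_false]
      rw [ih res (cur ++ [c]) (by simp only [List.length_append, List.length_singleton] at h18 ⊢; omega)]
      simp

-- B computes pvChunk of the flat filtered cell list
lemma pvB_eq (xs : List (List String)) : loadMaze1_alt xs = pvChunk (pvFlat xs) := by
  have h0 : loadMaze1_alt xs
      = pvFinish (xs.foldl (fun st row =>
          (PySem.List.pyRange 0 (PySem.List.len (xs.headD [])) 1).foldl
            (fun st j => pvStepB st (PySem.List.pyGetD row j "")) st) ([], [])) := rfl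
  rw [h0]
  simp only [pvRowB]
  rw [pvFoldlFlatMap]
  exact pvGo (xs.flatMap fun row =>
      (pvRowChars (PySem.List.len (xs.headD [])) row).filter pvKeep) [] [] (by simp)

-- A's nested loops, named (definitionally the port's maze3)
def pvFlatAux (xs : List (List String)) : List String :=
  (PySem.List.pyRange 0 (PySem.List.len xs) 1).foldl (fun acc i =>
    (PySem.List.pyRange 0 (PySem.List.len (PySem.List.pyGetD xs 0 [])) 1).foldl
      (fun acc j => pvStepA acc (PySem.List.pyGetD (PySem.List.pyGetD xs i []) j "")) acc) []

-- A's nested loops build the flat filtered cell list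
lemma pvA_flat (xs : List (List String)) : pvFlatAux xs = pvFlat xs := by
  unfold pvFlatAux
  simp only [pvRowA]
  rw [PySem.List.foldl_pyRange_zero_pyGetD xs []
    (fun acc row => acc ++ (pvRowChars (PySem.List.len (PySem.List.pyGetD xs 0 [])) row).filter pvKeep) []]
  rw [PySem.List.foldl_append_eq_flatMap]
  rw [show PySem.List.pyGetD xs 0 [] = xs.headD [] by
    rw [PySem.List.pyGetD_zero]; cases xs <;> rfl]
  rfl

-- chunking as a map over range(ceil(len/18))
lemma pvChunk_eq_map_range (n : Nat) (m : List String) (hn : n = (m.length + 17) / 18) :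
    (List.range n).map (fun k => (m.drop (18 * k)).take 18) = pvChunk m := by
  induction n generalizing m with
  | zero =>
    have hm : m.length = 0 := by omega
    have : m = [] := List.eq_nil_of_length_eq_zero hm
    subst this
    simp [pvChunk]
  | succ n ih =>
    have hpos : 0 < m.length := by omega
    have hne : m ≠ [] := List.ne_nil_of_length_pos hpos
    rw [pvChunk]
    simp only [hne, dite_false]
    rw [List.range_succ_eq_map, List.map_cons, List.map_map]
    congr 1
    rw [← ih (m.drop 18) (by simp only [List.length_drop]; omega)]
    apply List.map_congr_left
    intro k _
    simp only [Function.comp_apply, Nat.succ_eq_add_one, List.drop_drop]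
    congr 2
    omega

-- A's to_matrix over range(0, len, 18) with slices is pvChunk
lemma pvA_toMat (m : List String) :
    (PySem.List.pyRange 0 (PySem.List.len m) 18).map
      (fun i => PySem.List.slice m (some i) (some (i + 18))) = pvChunk m := by
  rw [PySem.List.pyRange_of_pos 0 (PySem.List.len m) (by norm_num), List.map_map]
  rw [← pvChunk_eq_map_range ((m.length + 17) / 18) m rfl]
  have hcount : (if (0:Int) < PySem.List.len m then
      ((PySem.List.len m - 0 + 18 - 1) / 18).toNat else 0) = (m.length + 17) / 18 := by
    simp only [PySem.List.len]
    split_ifs <;> omega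
  rw [hcount]
  apply List.map_congr_left
  intro k _
  have h1 : (0 : Int) + 18 * (k : Int) = ((18 * k : Nat) : Int) := by push_cast; ring
  simp only [Function.comp_apply, h1]
  rw [show ((18 * k : Nat) : Int) + 18 = ((18 * k : Nat) : Int) + ((18 : Nat) : Int) from rfl]
  rw [PySem.List.slice_natCast_add]

lemma pvKey (xs : List (List String)) : loadMaze1 xs = loadMaze1_alt xs := by
  have hA : loadMaze1 xs
      = (PySem.List.pyRange 0 (PySem.List.len (pvFlatAux xs)) 18).map
          (fun i => PySem.List.slice (pvFlatAux xs) (some i) (some (i + 18))) := rfl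
  rw [hA, pvA_toMat, pvB_eq, pvA_flat]

-- ===== VERDICT (by name: the statement is the Claim_ definition above) =====
theorem loadMaze1_spec : Claim_equal_loadMaze1 := by
  intro xs _ _
  unfold Spec_loadMaze1
  exact pvKey xs
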